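-- pv_equiv track=rewrite | github.com/brassc/FSL | DTI_Processing_Scripts/wm_proportion_lme_analysis.py | map_timepoint_to_string
-- ===== SOURCE A (Python) =====
-- def map_timepoint_to_string(numeric_timepoint):
--     """Convert numeric timepoint to string timepoint."""
--     timepoints = ['ultra-fast', 'fast', 'acute', '3mo', '6mo', '12mo', '24mo']
--     timepoint_ranges = [
--         (0, 48),        # ultra-fast: 0-48 hours (0-2 days)
--         (48, 192),      # fast: 48-192 hours (2-8 days)
--         (192, 1008),    # acute: 192-1008 hours (8-42 days)
--         (1008, 4296),   # 3mo: 42-179 days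
--         (4296, 6672),   # 6mo: 179-278 days
--         (6672, 12960),  # 12mo: 278-540 days
--         (12960, 500000) # 24mo: 540+ days
--     ]
--
--     for i, (min_val, max_val) in enumerate(timepoint_ranges):
--         if min_val <= numeric_timepoint < max_val:
--             return timepoints[i]
--
--     return timepoints[-1]
-- ===== SOURCE B (Python) =====
-- def map_timepoint_to_string(numeric_timepoint):
--     """Convert numeric timepoint to string timepoint (binary search on boundaries)."""
--     boundaries = [0, 48, 192, 1008, 4296, 6672, 12960, 500000]
--     timepoints = ['ultra-fast', 'fast', 'acute', '3mo', '6mo', '12mo', '24mo']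
--     lo, hi = 0, len(boundaries)
--     while lo < hi:
--         mid = (lo + hi) // 2
--         if numeric_timepoint < boundaries[mid]:
--             hi = mid
--         else:
--             lo = mid + 1
--     i = lo - 1
--     if i < 0 or i >= len(timepoints):
--         return timepoints[-1]
--     return timepoints[i]
-- ===== Notes on version B (the rewrite author's own statement) =====
-- stated objective: idiomatic
-- what changed: Replaced the linear scan over (min,max) range pairs with a binary search (hand-rolled bisect_right) over a sorted boundary list, with index guards reproducing the '24mo' fall-through for below-range and above-range inputs.
import Mathlib
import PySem

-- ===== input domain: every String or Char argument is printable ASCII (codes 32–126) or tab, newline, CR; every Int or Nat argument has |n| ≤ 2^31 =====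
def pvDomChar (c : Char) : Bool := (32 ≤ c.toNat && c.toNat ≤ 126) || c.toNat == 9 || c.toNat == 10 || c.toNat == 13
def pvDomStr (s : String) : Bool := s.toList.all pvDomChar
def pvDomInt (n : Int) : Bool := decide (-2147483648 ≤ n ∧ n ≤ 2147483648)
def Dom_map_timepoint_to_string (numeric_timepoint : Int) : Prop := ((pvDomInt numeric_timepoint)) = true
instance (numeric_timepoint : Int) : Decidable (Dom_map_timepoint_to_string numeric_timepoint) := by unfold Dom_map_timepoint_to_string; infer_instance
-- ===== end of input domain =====

-- ===== PORT A =====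
-- B changes the linear range-scan into a binary search over a sorted boundary table (idiomatic/alternative, same cost at k=7).
def pvTimepoints : List String := ["ultra-fast", "fast", "acute", "3mo", "6mo", "12mo", "24mo"]

def pvRanges : List (Int × Int) := [(0, 48), (48, 192), (192, 1008), (1008, 4296), (4296, 6672), (6672, 12960), (12960, 500000)]

-- the for-loop with early return: scan enumerate(timepoint_ranges)
def pvScan (numeric_timepoint : Int) : List (Int × (Int × Int)) → Option String
  | [] => none
  | (i, (mn, mx)) :: rest =>
    if mn ≤ numeric_timepoint ∧ numeric_timepoint < mx then
      PySem.List.pyGet? pvTimepoints i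
    else pvScan numeric_timepoint rest

def map_timepoint_to_string (numeric_timepoint : Int) : String :=
  match pvScan numeric_timepoint (PySem.List.enumerate pvRanges) with
  | some s => s
  | none => (PySem.List.pyGet? pvTimepoints (-1)).getD ""   -- index -1 is always valid here

-- ===== PORT B =====
def pvBoundaries : List Int := [0, 48, 192, 1008, 4296, 6672, 12960, 500000]

-- the while lo < hi binary-search loop of Source B
def pvBisect (numeric_timepoint : Int) (lo hi : Nat) : Nat :=
  if lo < hi then
    let mid := (lo + hi) / 2
    if numeric_timepoint < (PySem.List.pyGet? pvBoundaries (Int.ofNat mid)).getD 0 then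
      pvBisect numeric_timepoint lo mid
    else
      pvBisect numeric_timepoint (mid + 1) hi
  else lo
  termination_by hi - lo
  decreasing_by all_goals omega

def map_timepoint_to_string_alt (numeric_timepoint : Int) : String :=
  let lo := pvBisect numeric_timepoint 0 pvBoundaries.length
  let i : Int := (Int.ofNat lo) - 1
  if i < 0 ∨ i ≥ (pvTimepoints.length : Int) then
    (PySem.List.pyGet? pvTimepoints (-1)).getD ""
  else
    (PySem.List.pyGet? pvTimepoints i).getD ""

-- ===== PRECONDITION & SPEC =====
def Spec_map_timepoint_to_string (numeric_timepoint : Int) (out : String) : Prop := out = map_timepoint_to_string_alt numeric_timepoint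
instance (numeric_timepoint : Int) (out : String) : Decidable (Spec_map_timepoint_to_string numeric_timepoint out) := by unfold Spec_map_timepoint_to_string; infer_instance

-- ===== CLAIM (what is proved, stated in full; the proofs are below) =====
def Claim_equal_map_timepoint_to_string : Prop := ∀ (numeric_timepoint : Int), Dom_map_timepoint_to_string numeric_timepoint → Spec_map_timepoint_to_string numeric_timepoint (map_timepoint_to_string numeric_timepoint)

-- ===== LEMMAS AND PROOFS =====
lemma bisect_leaf (x : Int) (n : Nat) : pvBisect x n n = n := by
  rw [pvBisect]; simp

lemma bisect_eval (x : Int) :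
    pvBisect x 0 8 =
      if x < 4296 then
        (if x < 192 then (if x < 48 then (if x < 0 then 0 else 1) else 2)
         else (if x < 1008 then 3 else 4))
      else
        (if x < 12960 then (if x < 6672 then 5 else 6)
         else (if x < 500000 then 7 else 8)) := by
  have s1 : pvBisect x 0 8 = if x < 4296 then pvBisect x 0 4 else pvBisect x 5 8 := by
    rw [pvBisect]; norm_num [pvBoundaries, PySem.List.pyGet?, PySem.List.pyIdx?, Int.toNat]
  have s2 : pvBisect x 0 4 = if x < 192 then pvBisect x 0 2 else pvBisect x 3 4 := by
    rw [pvBisect]; norm_num [pvBoundaries, PySem.List.pyGet?, PySem.List.pyIdx?, Int.toNat]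
  have s3 : pvBisect x 0 2 = if x < 48 then pvBisect x 0 1 else pvBisect x 2 2 := by
    rw [pvBisect]; norm_num [pvBoundaries, PySem.List.pyGet?, PySem.List.pyIdx?, Int.toNat]
  have s4 : pvBisect x 0 1 = if x < 0 then pvBisect x 0 0 else pvBisect x 1 1 := by
    rw [pvBisect]; norm_num [pvBoundaries, PySem.List.pyGet?, PySem.List.pyIdx?, Int.toNat]
  have s5 : pvBisect x 3 4 = if x < 1008 then pvBisect x 3 3 else pvBisect x 4 4 := by
    rw [pvBisect]; norm_num [pvBoundaries, PySem.List.pyGet?, PySem.List.pyIdx?, Int.toNat]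
  have s6 : pvBisect x 5 8 = if x < 12960 then pvBisect x 5 6 else pvBisect x 7 8 := by
    rw [pvBisect]; norm_num [pvBoundaries, PySem.List.pyGet?, PySem.List.pyIdx?, Int.toNat]
  have s7 : pvBisect x 5 6 = if x < 6672 then pvBisect x 5 5 else pvBisect x 6 6 := by
    rw [pvBisect]; norm_num [pvBoundaries, PySem.List.pyGet?, PySem.List.pyIdx?, Int.toNat]
  have s8 : pvBisect x 7 8 = if x < 500000 then pvBisect x 7 7 else pvBisect x 8 8 := by
    rw [pvBisect]; norm_num [pvBoundaries, PySem.List.pyGet?, PySem.List.pyIdx?, Int.toNat]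
  simp only [s1, s2, s3, s4, s5, s6, s7, s8, bisect_leaf]

-- ===== VERDICT (by name: the statement is the Claim_ definition above) =====
set_option maxRecDepth 8192 in
set_option maxHeartbeats 2000000 in
theorem map_timepoint_to_string_spec : Claim_equal_map_timepoint_to_string := by
  intro x _
  unfold Spec_map_timepoint_to_string map_timepoint_to_string map_timepoint_to_string_alt
  have hlen : pvBoundaries.length = 8 := by simp [pvBoundaries]
  rw [hlen, bisect_eval]
  norm_num [pvScan, pvRanges, PySem.List.enumerate_cons, PySem.List.enumerate_nil]
  split_ifs <;>
    simp_all [pvTimepoints, PySem.List.pyGet?, PySem.List.pyIdx?, Int.toNat] <;> omega
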